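-- pv_equiv track=rewrite | github.com/Alleria1809/UIndex-master | UIndex-master/main/routes.py | tempScore
-- ===== SOURCE A (Python) =====
-- def tempScore(l):
--     result = 0
--     for i in l:
--         result += abs(68 - i)
--     if result <= 10:
--         return 60
--     elif result <= 30:
--         return 58
--     elif result <= 50:
--         return 55
--     elif result <= 76:
--         return 53
--     elif result <= 105:
--         return 50
--     elif result <= 143:
--         return 46
--     elif result <= 172:
--         return 43
--     elif result <= 201:
--         return 40
--     elif result <= 241:
--         return 35
--     elif result <= 279:
--         return 30
--     elif result <= 305:
--         return 28
--     else:
--         return 24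
-- ===== SOURCE B (Python) =====
-- _THRESHOLDS = [10, 30, 50, 76, 105, 143, 172, 201, 241, 279, 305]
-- _SCORES = [60, 58, 55, 53, 50, 46, 43, 40, 35, 30, 28, 24]
--
-- def _bisect_left(xs, x):
--     lo, hi = 0, len(xs)
--     while lo < hi:
--         mid = (lo + hi) // 2
--         if xs[mid] < x:
--             lo = mid + 1
--         else:
--             hi = mid
--     return lo
--
-- def tempScore(l):
--     result = sum(abs(68 - i) for i in l)
--     return _SCORES[_bisect_left(_THRESHOLDS, result)]
-- ===== Notes on version B (the rewrite author's own statement) =====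
-- stated objective: idiomatic
-- what changed: The 12-branch if/elif cascade is replaced by a threshold table plus a bisect_left binary search selecting the score bucket; the sum is computed with sum() over a generator instead of an accumulator loop.
import Mathlib
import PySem

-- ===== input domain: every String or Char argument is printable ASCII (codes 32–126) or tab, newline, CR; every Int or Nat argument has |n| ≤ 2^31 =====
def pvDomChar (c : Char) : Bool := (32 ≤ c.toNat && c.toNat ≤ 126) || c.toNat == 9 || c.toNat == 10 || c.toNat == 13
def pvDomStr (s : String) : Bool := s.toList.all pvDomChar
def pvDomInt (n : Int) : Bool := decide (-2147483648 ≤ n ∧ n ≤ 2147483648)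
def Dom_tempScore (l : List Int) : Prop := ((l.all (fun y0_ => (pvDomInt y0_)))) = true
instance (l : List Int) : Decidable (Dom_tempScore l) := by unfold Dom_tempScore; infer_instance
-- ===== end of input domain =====

-- B replaces the if/elif cascade by a threshold table + bisect_left binary search (idiomatic table lookup).

-- ===== PORT A =====
def tempScore (l : List Int) : Int :=
  let result := l.foldl (fun r i => r + |68 - i|) 0
  if result ≤ 10 then 60
  else if result ≤ 30 then 58
  else if result ≤ 50 then 55
  else if result ≤ 76 then 53
  else if result ≤ 105 then 50
  else if result ≤ 143 then 46
  else if result ≤ 172 then 43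
  else if result ≤ 201 then 40
  else if result ≤ 241 then 35
  else if result ≤ 279 then 30
  else if result ≤ 305 then 28
  else 24

-- ===== PORT B =====
def pvThresholds : List Int := [10, 30, 50, 76, 105, 143, 172, 201, 241, 279, 305]
def pvScores : List Int := [60, 58, 55, 53, 50, 46, 43, 40, 35, 30, 28, 24]

-- hand-written binary search, as in Source B's _bisect_left
def pvBisectLeft (xs : List Int) (x : Int) (lo hi : Nat) : Nat :=
  if _h : lo < hi then
    let mid := (lo + hi) / 2
    if xs.getD mid 0 < x then pvBisectLeft xs x (mid + 1) hi
    else pvBisectLeft xs x lo mid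
  else lo
termination_by hi - lo
decreasing_by all_goals omega

def tempScore_alt (l : List Int) : Int :=
  let result := (l.map (fun i => |68 - i|)).sum
  pvScores.getD (pvBisectLeft pvThresholds result 0 pvThresholds.length) 0

-- ===== PRECONDITION & SPEC =====
def Spec_tempScore (l : List Int) (out : Int) : Prop := out = tempScore_alt l
instance (l : List Int) (out : Int) : Decidable (Spec_tempScore l out) := by unfold Spec_tempScore; infer_instance

-- ===== CLAIM (what is proved, stated in full; the proofs are below) =====
def Claim_equal_tempScore : Prop := ∀ (l : List Int), Dom_tempScore l → Spec_tempScore l (tempScore l)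

-- ===== LEMMAS AND PROOFS =====
theorem sum_eq_foldl (l : List Int) :
    (l.map (fun i => |68 - i|)).sum = l.foldl (fun r i => r + |68 - i|) 0 := by
  rw [List.sum_eq_foldl (l := l.map _), List.foldl_map]

set_option maxHeartbeats 1000000 in
theorem bucket_eq (r : Int) :
    pvScores.getD (pvBisectLeft pvThresholds r 0 pvThresholds.length) 0 =
    (if r ≤ 10 then (60:Int)
     else if r ≤ 30 then 58 else if r ≤ 50 then 55 else if r ≤ 76 then 53
     else if r ≤ 105 then 50 else if r ≤ 143 then 46 else if r ≤ 172 then 43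
     else if r ≤ 201 then 40 else if r ≤ 241 then 35 else if r ≤ 279 then 30
     else if r ≤ 305 then 28 else 24) := by
  show pvScores.getD (pvBisectLeft pvThresholds r 0 11) 0 = _
  split_ifs <;>
    (simp [pvBisectLeft, pvThresholds, pvScores, List.getD] <;> split_ifs <;> (first | omega | rfl))

-- ===== VERDICT (by name: the statement is the Claim_ definition above) =====
theorem tempScore_spec : Claim_equal_tempScore := by
  intro l _
  unfold Spec_tempScore tempScore tempScore_alt
  rw [sum_eq_foldl, bucket_eq]
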